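-- pv_equiv track=rewrite | github.com/Aymen5285356/serie_6_python | Exercice 5.py | comptage
-- ===== SOURCE A (Python) =====
-- def comptage(mot):
--     dico = {}
--     for caractere in mot:
--         if caractere.isalpha() and caractere.isupper():
--             if caractere in dico:
--                 dico[caractere] += 1
--             else:
--                 dico[caractere] = 1
--     return dico
-- ===== SOURCE B (Python) =====
-- def comptage(mot):
--     # distinct-then-count: dedup first (first-appearance order), then count each
--     # uppercase letter by rescanning mot with str.count, instead of one-pass accumulation
--     return {c: mot.count(c) for c in dict.fromkeys(mot) if c.isalpha() and c.isupper()}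
-- ===== Notes on version B (the rewrite author's own statement) =====
-- stated objective: simpler
-- what changed: Replaced the single-pass dict accumulation (membership test, then += or = 1) by a one-line distinct-then-count comprehension: dedup the characters, filter to uppercase letters, and count each with a str.count rescan.
import Mathlib
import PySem

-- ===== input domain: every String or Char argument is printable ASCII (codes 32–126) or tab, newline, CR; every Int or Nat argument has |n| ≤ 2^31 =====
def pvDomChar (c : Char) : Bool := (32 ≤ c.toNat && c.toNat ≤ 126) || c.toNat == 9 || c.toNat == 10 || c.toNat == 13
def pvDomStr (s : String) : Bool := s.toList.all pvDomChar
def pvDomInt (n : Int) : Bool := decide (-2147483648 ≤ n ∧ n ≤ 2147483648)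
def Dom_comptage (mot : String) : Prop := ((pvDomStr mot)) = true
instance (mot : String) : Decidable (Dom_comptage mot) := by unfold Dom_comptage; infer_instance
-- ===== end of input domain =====

-- B replaces A's single-pass dict accumulation by a distinct-then-count comprehension
-- (dedup, filter to uppercase letters, count each with str.count): simpler one-liner.

-- ===== PORT A =====
-- one pass over mot, accumulating counts in an insertion-ordered dict
def comptage (mot : String) : List (String × Int) :=
  (mot.toList.foldl
    (fun (dico : PySem.Dict String Int) caractere =>
      if PySem.Chars.isalpha caractere && PySem.Chars.isupper caractere then
        if dico.contains (String.ofList [caractere]) then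
          dico.insert (String.ofList [caractere]) (dico.getD (String.ofList [caractere]) 0 + 1)
        else
          dico.insert (String.ofList [caractere]) 1
      else dico)
    PySem.Dict.empty).items

-- ===== PORT B =====
-- the dict comprehension iterates over distinct keys (dict.fromkeys = PySem.List.dedup),
-- so its items list is exactly this map over the filtered dedup
def comptage_alt (mot : String) : List (String × Int) :=
  ((PySem.List.dedup mot.toList).filter
      (fun c => PySem.Chars.isalpha c && PySem.Chars.isupper c)).map
    (fun c => (String.ofList [c], (PySem.Str.count mot (String.ofList [c]) : Int)))

-- ===== PRECONDITION & SPEC =====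
def Spec_comptage (mot : String) (out : List (String × Int)) : Prop := out = comptage_alt mot
instance (mot : String) (out : List (String × Int)) : Decidable (Spec_comptage mot out) := by unfold Spec_comptage; infer_instance

-- ===== CLAIM (what is proved, stated in full; the proofs are below) =====
def Claim_equal_comptage : Prop := ∀ (mot : String), Dom_comptage mot → Spec_comptage mot (comptage mot)

-- ===== LEMMAS AND PROOFS =====

-- counting the singleton substring [c] is counting the character c
theorem count_go_singleton (c : Char) :
    ∀ (fuel : Nat) (l : List Char) (acc : Nat), l.length ≤ fuel →
      PySem.Chars.count.go [c] fuel l acc = acc + l.count c := by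
  intro fuel
  induction fuel with
  | zero =>
    intro l acc h
    have : l = [] := List.eq_nil_of_length_eq_zero (Nat.le_zero.mp h)
    subst this; simp [PySem.Chars.count.go]
  | succ n ih =>
    intro l acc h
    cases l with
    | nil => simp [PySem.Chars.count.go]
    | cons a t =>
      simp only [PySem.Chars.count.go]
      by_cases hac : c = a
      · subst hac
        have hpre : List.isPrefixOf [c] (c :: t) = true := by
          simp [List.isPrefixOf]
        rw [if_pos hpre]
        have hd : List.drop [c].length (c :: t) = t := by simp
        rw [hd, ih t (acc + 1) (by simp at h; omega)]
        simp
        omega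
      · have hpre : List.isPrefixOf [c] (a :: t) = false := by
          simp [List.isPrefixOf]; exact hac
        rw [if_neg (by simp [hpre])]
        rw [ih t acc (by simp at h; omega)]
        have hb : (a == c) = false := by
          simp; exact fun hh => hac hh.symm
        simp [List.count_cons, hb]

theorem chars_count_singleton (l : List Char) (c : Char) :
    PySem.Chars.count l [c] = l.count c := by
  simp only [PySem.Chars.count, List.isEmpty_cons]
  simpa using count_go_singleton c l.length l 0 le_rfl

-- discard commutes with filter
theorem discard_filter {α : Type} [BEq α] (s : List α) (x : α) (p : α → Bool) :
    (PySem.Set.discard s x).filter p = PySem.Set.discard (s.filter p) x := by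
  simp only [PySem.Set.discard, List.filter_filter]
  congr 1; funext y; rw [Bool.and_comm]

-- Set.ofList commutes with filter
theorem ofList_filter {α : Type} [BEq α] [LawfulBEq α] (l : List α) (p : α → Bool) :
    PySem.Set.ofList (l.filter p) = (PySem.Set.ofList l).filter p := by
  induction l with
  | nil => simp [PySem.Set.ofList_nil]
  | cons x xs ih =>
    by_cases hp : p x = true
    · rw [List.filter_cons_of_pos hp, PySem.Set.ofList_cons, PySem.Set.ofList_cons,
        List.filter_cons_of_pos hp, ih, discard_filter]
    · have hp' : p x = false := by simpa using hp
      rw [List.filter_cons_of_neg (by simp [hp']), PySem.Set.ofList_cons,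
        List.filter_cons_of_neg (by simp [hp']), ih, discard_filter]
      unfold PySem.Set.discard
      symm
      apply List.filter_eq_self.mpr
      intro y hy
      have hyp : p y = true := (List.mem_filter.mp hy).2
      simp only [Bool.not_eq_eq_eq_not, Bool.not_true, beq_eq_false_iff_ne]
      intro hyx; rw [hyx, hp'] at hyp; exact absurd hyp (by simp)

-- Set.ofList commutes with map of an injective function
theorem ofList_map {α β : Type} [BEq α] [LawfulBEq α] [BEq β] [LawfulBEq β]
    (l : List α) (f : α → β) (hf : Function.Injective f) :
    PySem.Set.ofList (l.map f) = (PySem.Set.ofList l).map f := by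
  induction l with
  | nil => simp [PySem.Set.ofList_nil]
  | cons x xs ih =>
    simp only [List.map_cons, PySem.Set.ofList_cons, ih]
    congr 1
    unfold PySem.Set.discard
    rw [List.filter_map]
    congr 1
    apply List.filter_congr
    intro y _
    by_cases hyx : y = x
    · subst hyx; simp
    · have h1 : (f y == f x) = false := beq_eq_false_iff_ne.mpr (fun hfy => hyx (hf hfy))
      have h2 : (y == x) = false := beq_eq_false_iff_ne.mpr hyx
      simp [h1, h2]

theorem ofListSingleton_injective : Function.Injective (fun c : Char => String.ofList [c]) := by
  intro a b h
  have := congrArg String.toList h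
  simpa using this

-- ===== VERDICT (by name: the statement is the Claim_ definition above) =====
theorem comptage_spec : Claim_equal_comptage := by
  intro mot _
  unfold Spec_comptage comptage comptage_alt
  set p : Char → Bool := fun c => PySem.Chars.isalpha c && PySem.Chars.isupper c with hp
  set key : Char → String := fun c => String.ofList [c] with hkey
  set l : List Char := mot.toList with hl
  -- A's loop body is a counter update on key c, guarded by p c
  have hbody : (l.foldl
      (fun (dico : PySem.Dict String Int) caractere =>
        if p caractere then
          if dico.contains (key caractere) then
            dico.insert (key caractere) (dico.getD (key caractere) 0 + 1)
          else
            dico.insert (key caractere) 1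
        else dico)
      PySem.Dict.empty)
      = PySem.Dict.counter ((l.filter p).map key) := by
    rw [PySem.Dict.counter_eq_foldl, List.foldl_map, ← List.foldl_filter]
    apply PySem.List.foldl_congr_mem
    intro d c _
    by_cases hc : d.contains (key c) = true
    · simp [PySem.Dict.modify, hc]
    · have hc' : d.contains (key c) = false := by simpa using hc
      simp [PySem.Dict.modify, hc', PySem.Dict.getD_of_not_contains d 0 hc']
  rw [hbody, PySem.Dict.items_counter,
    ofList_map _ key ofListSingleton_injective, ofList_filter, List.map_map,
    PySem.List.dedup_eq_ofList]
  apply List.map_congr_left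
  intro c hc
  have hpc : p c = true := (List.mem_filter.mp hc).2
  simp only [Function.comp_apply]
  congr 1
  rw [List.count_map_of_injective _ key ofListSingleton_injective,
    List.count_filter hpc]
  have hkl : (key c).toList = [c] := by simp [hkey]
  rw [PySem.Str.count_eq, hkl, chars_count_singleton]
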